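-- pv_equiv track=rewrite | github.com/MrHamdulay/csc3-capstone | examples/data/Assignment_8/mnhper001/question2.py | rep_characters
-- ===== SOURCE A (Python) =====
-- def rep_characters(string):
--     if len(string)==1:
--         return 0
--     if string=="":
--         return 0
--     else:
--         if string[0]!=string[1]:
--             return 0+rep_characters(string[1:])
--         else:
--             return 1+rep_characters(string[2:])
-- ===== SOURCE B (Python) =====
-- def rep_characters(string):
--     # run-length scan: each maximal run of k equal chars contributes k // 2 pairs
--     total = 0
--     run = 0
--     prev = None
--     for ch in string:
--         if prev is not None and ch == prev:
--             run += 1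
--         else:
--             total += run // 2
--             run = 1
--             prev = ch
--     return total + run // 2
-- ===== Notes on version B (the rewrite author's own statement) =====
-- stated objective: alternative
-- what changed: Replaces the greedy consume/skip recursion with slicing by a single run-length scan that keeps only the current run length and adds run//2 at each run boundary.
import Mathlib
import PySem

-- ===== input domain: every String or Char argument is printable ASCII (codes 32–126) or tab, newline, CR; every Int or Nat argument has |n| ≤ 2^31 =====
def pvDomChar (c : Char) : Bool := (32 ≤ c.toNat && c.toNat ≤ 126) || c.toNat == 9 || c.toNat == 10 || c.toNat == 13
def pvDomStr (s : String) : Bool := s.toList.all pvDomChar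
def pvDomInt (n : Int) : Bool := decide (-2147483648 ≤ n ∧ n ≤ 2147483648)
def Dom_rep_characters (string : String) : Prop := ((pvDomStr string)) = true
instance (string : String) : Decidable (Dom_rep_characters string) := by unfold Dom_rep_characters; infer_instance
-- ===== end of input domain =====

-- B replaces A's greedy consume/skip recursion with a single run-length scan summing run//2 (alternative algorithm, no quirks to mimic).

-- ===== PORT A =====
-- A: if len==1 → 0; if "" → 0; else compare first two chars, recurse on s[1:] or s[2:]
def pvRepA : List Char → Int
  | [] => 0
  | [_] => 0
  | a :: b :: t => if a != b then 0 + pvRepA (b :: t) else 1 + pvRepA t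

def rep_characters (string : String) : Int := pvRepA string.toList

-- ===== PORT B =====
-- state = (total, run, prev); one step of B's for-loop
def pvRepStep (st : Int × Int × Option Char) (ch : Char) : Int × Int × Option Char :=
  if st.2.2 ≠ none ∧ some ch = st.2.2 then (st.1, st.2.1 + 1, st.2.2)
  else (st.1 + PySem.Int.floordiv st.2.1 2, 1, some ch)

def rep_characters_alt (string : String) : Int :=
  let st := string.toList.foldl pvRepStep (0, 0, none)
  st.1 + PySem.Int.floordiv st.2.1 2

-- ===== PRECONDITION & SPEC =====
def Spec_rep_characters (string : String) (out : Int) : Prop := out = rep_characters_alt string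
instance (string : String) (out : Int) : Decidable (Spec_rep_characters string out) := by unfold Spec_rep_characters; infer_instance

-- ===== CLAIM (what is proved, stated in full; the proofs are below) =====
def Claim_equal_rep_characters : Prop := ∀ (string : String), Dom_rep_characters string → Spec_rep_characters string (rep_characters string)

-- ===== LEMMAS AND PROOFS =====

-- a maximal run of r equal chars contributes r/2, independently of what follows (next char differs)
theorem pvRepA_replicate (r : Nat) (p : Char) (l : List Char) (h : l.head? ≠ some p) :
    pvRepA (List.replicate r p ++ l) = ((r / 2 : Nat) : Int) + pvRepA l := by
  induction r using Nat.strong_induction_on with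
  | _ r ih =>
    match r with
    | 0 => simp
    | 1 =>
      cases l with
      | nil => simp [pvRepA]
      | cons c l' =>
        have hc : (p != c) = true := by
          simp only [List.head?] at h
          simp [bne_iff_ne]; intro e; exact h (by simp [e])
        simp [pvRepA, hc]
    | (r + 2) =>
      have : List.replicate (r + 2) p ++ l = p :: p :: (List.replicate r p ++ l) := by
        simp [List.replicate_succ]
      rw [this]
      simp only [pvRepA, bne_self_eq_false, Bool.false_eq_true, if_false]
      rw [ih r (by omega) ]
      have : (r + 2) / 2 = r / 2 + 1 := by omega
      rw [this]
      push_cast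
      ring

-- loop invariant for B's fold: from state (t, r, some p) the final answer is
-- t plus A's greedy count of the pending run followed by the rest
theorem pvFold_inv (l : List Char) : ∀ (t : Int) (r : Nat) (p : Char),
    (let st := l.foldl pvRepStep (t, (r : Int), some p)
     st.1 + PySem.Int.floordiv st.2.1 2) = t + pvRepA (List.replicate r p ++ l) := by
  induction l with
  | nil =>
    intro t r p
    have h := pvRepA_replicate r p [] (by simp)
    simp only [List.append_nil] at h
    have hf : PySem.Int.floordiv (r : Int) 2 = ((r / 2 : Nat) : Int) := by
      exact_mod_cast PySem.Int.floordiv_natCast r 2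
    simp only [List.foldl_nil, List.append_nil]
    rw [h, hf]
    simp [pvRepA]
  | cons c l' ih =>
    intro t r p
    by_cases hc : c = p
    · subst hc
      simp only [List.foldl_cons]
      have hstep : pvRepStep (t, (r : Int), some c) c = (t, ((r : Int) + 1), some c) := by
        simp [pvRepStep]
      rw [hstep]
      have : ((r : Int) + 1) = ((r + 1 : Nat) : Int) := by push_cast; ring
      rw [this, ih t (r + 1) c]
      congr 2
      rw [List.replicate_succ' ]
      simp
    · simp only [List.foldl_cons]
      have hcond : ¬(((some p : Option Char) ≠ none) ∧ some c = some p) := by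
        simp [hc]
      have hstep : pvRepStep (t, (r : Int), some p) c =
          (t + PySem.Int.floordiv (r : Int) 2, 1, some c) := by
        simp only [pvRepStep, hcond, if_false]
      rw [hstep]
      have h1 : (1 : Int) = ((1 : Nat) : Int) := by norm_num
      rw [h1, ih (t + PySem.Int.floordiv (r : Int) 2) 1 c]
      rw [pvRepA_replicate r p (c :: l') (by simp [hc])]
      have : List.replicate 1 c ++ l' = c :: l' := by simp
      have hf : PySem.Int.floordiv (r : Int) 2 = ((r / 2 : Nat) : Int) := by
        exact_mod_cast PySem.Int.floordiv_natCast r 2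
      rw [this, hf]
      ring

-- ===== VERDICT (by name: the statement is the Claim_ definition above) =====
theorem rep_characters_spec : Claim_equal_rep_characters := by
  intro s _
  unfold Spec_rep_characters rep_characters rep_characters_alt
  cases hs : s.toList with
  | nil => simp [pvRepA, PySem.Int.floordiv]
  | cons c l =>
    simp only [List.foldl_cons]
    have hstep : pvRepStep (0, 0, none) c = (0, 1, some c) := by
      simp [pvRepStep, PySem.Int.floordiv]
    rw [hstep]
    have h1 : ((0 : Int), (1 : Int), some c) = ((0 : Int), ((1 : Nat) : Int), some c) := by norm_num
    rw [h1]
    have := pvFold_inv l 0 1 c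
    simp only at this
    rw [this]
    simp
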